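-- pv_equiv track=rewrite | github.com/yoonwoo123/Algorithm | 200507프로/스킬체크2.py | solution
-- ===== SOURCE A (Python) =====
-- def solution(stones, k):
--     answer = 0
--     left = min(stones)
--     right = max(stones)
--     while left <= right:
--         mid = (left + right) // 2
--         cnt = 0
--         flag = True
--         for i in range(len(stones)):
--             if mid > stones[i]:
--                 cnt += 1
--                 if cnt >= k:
--                     flag = False
--                     break
--             else:
--                 cnt = 0
--         if flag:
--             left = mid + 1
--         else:
--             right = mid - 1
--     return right
-- ===== SOURCE B (Python) =====
-- def solution(stones, k):
--     # Crossing is possible at water level m iff no max(k,1) consecutive stones are all below m;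
--     # the answer is therefore the minimum over all windows of length max(k,1) of the window maximum
--     # (or max(stones) when the window is longer than the list).
--     n = len(stones)
--     w = k if k > 1 else 1
--     if w > n:
--         return max(stones)
--     return min(max(stones[i:i + w]) for i in range(n - w + 1))
-- ===== Notes on version B (the rewrite author's own statement) =====
-- stated objective: alternative
-- what changed: A binary-searches the answer over the stone-value range, re-scanning the whole list per candidate; B computes the answer directly as the minimum over all length-max(k,1) windows of the window maximum, with no search over values.
-- outside the precondition, e.g. on solution([], 3): A raises ValueError, B raises ValueError
import Mathlib
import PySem

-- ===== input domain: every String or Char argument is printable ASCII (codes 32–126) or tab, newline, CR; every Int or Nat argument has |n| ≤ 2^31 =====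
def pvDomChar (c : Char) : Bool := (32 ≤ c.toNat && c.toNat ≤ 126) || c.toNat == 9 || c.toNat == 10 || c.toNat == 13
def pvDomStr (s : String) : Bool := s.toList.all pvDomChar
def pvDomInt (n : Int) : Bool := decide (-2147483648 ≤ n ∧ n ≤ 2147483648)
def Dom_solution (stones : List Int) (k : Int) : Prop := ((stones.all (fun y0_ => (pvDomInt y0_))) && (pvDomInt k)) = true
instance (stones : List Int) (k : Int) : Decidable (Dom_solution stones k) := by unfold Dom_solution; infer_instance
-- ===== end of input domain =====

-- B replaces A's binary search over the answer value by a direct minimum over the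
-- maxima of all length-max(k,1) windows (objective: alternative algorithm, no speed claim).

-- ===== PORT A =====
-- the inner 'for i in range(len(stones))' loop of A: returns the final 'flag'
def flagLoop (k mid : Int) : List Int → Int → Bool
  | [], _ => true
  | x :: xs, cnt =>
    if mid > x then
      if cnt + 1 ≥ k then false
      else flagLoop k mid xs (cnt + 1)
    else flagLoop k mid xs 0

-- the 'while left <= right' loop of A ('answer = 0' in A is dead code).
-- fuel = one more than the initial interval width bounds the iteration count
-- (each step strictly shrinks right - left), so the fuel-out branch is never reached.
def bsLoop (stones : List Int) (k : Int) : Nat → Int → Int → Int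
  | 0, _, right => right
  | fuel + 1, left, right =>
    if left ≤ right then
      if flagLoop k (PySem.Int.floordiv (left + right) 2) stones 0 then
        bsLoop stones k fuel (PySem.Int.floordiv (left + right) 2 + 1) right
      else
        bsLoop stones k fuel left (PySem.Int.floordiv (left + right) 2 - 1)
    else right

-- min(stones)/max(stones) raise ValueError on [] (excluded by Pre_), hence .getD 0
def solution (stones : List Int) (k : Int) : Int :=
  bsLoop stones k
    ((((PySem.List.max? stones (fun y => y)).getD 0) + 1
        - ((PySem.List.min? stones (fun y => y)).getD 0)).toNat + 1)
    ((PySem.List.min? stones (fun y => y)).getD 0)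
    ((PySem.List.max? stones (fun y => y)).getD 0)

-- ===== PORT B =====
def solution_alt (stones : List Int) (k : Int) : Int :=
  let n : Int := stones.length
  let w : Int := if k > 1 then k else 1
  if w > n then (PySem.List.max? stones (fun y => y)).getD 0
  else
    (PySem.List.min?
      ((PySem.List.pyRange 0 (n - w + 1)).map
        (fun i =>
          (PySem.List.max? (PySem.List.slice stones (some i) (some (i + w)))
            (fun y => y)).getD 0))
      (fun y => y)).getD 0

-- ===== PRECONDITION & SPEC =====
-- Pre_ excludes only the empty list, on which A's min(stones) raises ValueError (B raises too).
def Pre_solution (stones : List Int) (_k : Int) : Prop := stones ≠ []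
instance (stones : List Int) (k : Int) : Decidable (Pre_solution stones k) := by
  unfold Pre_solution; infer_instance
def pvWitness_solution : List Int × Int := ([2, 4, 1], 2)

def Spec_solution (stones : List Int) (k : Int) (out : Int) : Prop := out = solution_alt stones k
instance (stones : List Int) (k : Int) (out : Int) : Decidable (Spec_solution stones k out) := by
  unfold Spec_solution; infer_instance

-- ===== CLAIM (what is proved, stated in full; the proofs are below) =====
def Claim_equal_solution : Prop := ∀ (stones : List Int) (k : Int), Dom_solution stones k → Pre_solution stones k → Spec_solution stones k (solution stones k)

-- ===== LEMMAS AND PROOFS =====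

-- max(q) for a nonempty q, as solution_alt computes it
def wmax (q : List Int) : Int := (PySem.List.max? q (fun y => y)).getD 0

lemma wmax_spec {q : List Int} (hq : q ≠ []) : wmax q ∈ q ∧ ∀ x ∈ q, x ≤ wmax q := by
  obtain ⟨x, t, rfl⟩ := List.exists_cons_of_ne_nil hq
  have h : PySem.List.max? (x :: t) (fun y => y) = some (t.foldl max x) :=
    PySem.List.max?_id_cons x t
  constructor
  · have := PySem.List.max?_mem h
    simpa [wmax, h] using this
  · have := PySem.List.max?_isMax h
    intro y hy
    simpa [wmax, h] using this y hy

-- characterisation of A's inner loop: 'flag = False' ⟺ some block of consecutive stones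
-- below mid completes the count (continuing the incoming cnt when it starts the list)
lemma flagLoop_eq_false_iff (k m : Int) :
    ∀ (l : List Int) (c : Int), 0 ≤ c →
      (flagLoop k m l c = false ↔
        ∃ p q r : List Int, l = p ++ q ++ r ∧ q ≠ [] ∧ (∀ x ∈ q, x < m) ∧
          k ≤ (if p = [] then c else 0) + q.length) := by
  intro l
  induction l with
  | nil =>
    intro c hc
    simp only [flagLoop]
    constructor
    · intro h; simp at h
    · rintro ⟨p, q, r, hl, hq, -, -⟩
      have := hl.symm
      simp only [List.append_eq_nil_iff] at this
      exact absurd this.1.2 hq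
  | cons x xs ih =>
    intro c hc
    by_cases hx : m > x
    · by_cases hk : c + 1 ≥ k
      · simp only [flagLoop, if_pos hx, if_pos hk]
        exact ⟨fun _ => ⟨[], [x], xs, by simp, by simp, by simpa using hx, by simpa using hk⟩,
               fun _ => by trivial⟩
      · simp only [flagLoop, if_pos hx, if_neg hk]
        rw [ih (c + 1) (by omega)]
        constructor
        · rintro ⟨p, q, r, hl, hq, hqm, hcnt⟩
          cases p with
          | nil =>
            simp only [List.nil_append] at hl
            refine ⟨[], x :: q, r, by simp [hl], by simp, ?_, ?_⟩
            · intro y hy; rcases List.mem_cons.mp hy with rfl | hy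
              · exact hx
              · exact hqm y hy
            · simp; omega
          | cons a p' =>
            simp at hcnt
            exact ⟨x :: a :: p', q, r, by simp [hl], hq, hqm, by simp; omega⟩
        · rintro ⟨p, q, r, hl, hq, hqm, hcnt⟩
          cases p with
          | nil =>
            simp only [List.nil_append] at hl
            obtain ⟨q', rfl⟩ : ∃ q', q = x :: q' := by
              cases q with
              | nil => exact absurd rfl hq
              | cons a q' =>
                simp only [List.cons_append] at hl
                exact ⟨q', by simp [(List.cons_eq_cons.mp hl).1]⟩
            simp only [List.cons_append] at hl
            have htl := (List.cons_eq_cons.mp hl).2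
            have hq' : q' ≠ [] := by
              rintro rfl; simp at hcnt; omega
            refine ⟨[], q', r, htl, hq', fun y hy => hqm y (List.mem_cons_of_mem _ hy), ?_⟩
            simp at hcnt ⊢; omega
          | cons a p' =>
            simp only [List.cons_append] at hl
            obtain ⟨hxa, htl⟩ := List.cons_eq_cons.mp hl
            subst hxa
            simp at hcnt
            refine ⟨p', q, r, htl, hq, hqm, ?_⟩
            have hq1 : 1 ≤ q.length := List.length_pos_iff.mpr hq
            split_ifs with h
            · omega
            · simpa using hcnt
    · simp only [flagLoop, if_neg hx]
      rw [ih 0 le_rfl]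
      constructor
      · rintro ⟨p, q, r, hl, hq, hqm, hcnt⟩
        refine ⟨x :: p, q, r, by simp [hl], hq, hqm, ?_⟩
        split_ifs at hcnt with h
        · simp; omega
        · simp; omega
      · rintro ⟨p, q, r, hl, hq, hqm, hcnt⟩
        cases p with
        | nil =>
          simp only [List.nil_append] at hl
          obtain ⟨q', rfl⟩ : ∃ q', q = x :: q' := by
            cases q with
            | nil => exact absurd rfl hq
            | cons a q' =>
              simp only [List.cons_append] at hl
              exact ⟨q', by simp [(List.cons_eq_cons.mp hl).1]⟩
          exact absurd (hqm x (by simp)) (by omega)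
        | cons a p' =>
          simp only [List.cons_append] at hl
          obtain ⟨hxa, htl⟩ := List.cons_eq_cons.mp hl
          subst hxa
          simp at hcnt
          refine ⟨p', q, r, htl, hq, hqm, ?_⟩
          split_ifs with h
          · simpa using hcnt
          · simpa using hcnt

lemma flag_false_iff_window (k m : Int) (l : List Int) :
    flagLoop k m l 0 = false ↔
      ∃ p q r : List Int, l = p ++ q ++ r ∧ (q.length : Int) = max k 1 ∧ (∀ x ∈ q, x < m) := by
  rw [flagLoop_eq_false_iff k m l 0 le_rfl]
  constructor
  · rintro ⟨p, q, r, hl, hq, hqm, hcnt⟩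
    have hcnt' : k ≤ (q.length : Int) := by split_ifs at hcnt <;> simpa using hcnt
    have hq1 : 1 ≤ q.length := List.length_pos_iff.mpr hq
    set w : Nat := (max k 1).toNat with hwdef
    have hwq : w ≤ q.length := by omega
    refine ⟨p, q.take w, q.drop w ++ r, ?_, ?_, ?_⟩
    · rw [hl]; simp; rw [← List.append_assoc, List.take_append_drop]
    · simp [List.length_take]; omega
    · intro y hy; exact hqm y (List.mem_of_mem_take hy)
  · rintro ⟨p, q, r, hl, hql, hqm⟩
    have hq1 : 1 ≤ q.length := by omega
    refine ⟨p, q, r, hl, List.length_pos_iff.mp hq1, hqm, ?_⟩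
    split_ifs <;> simp <;> omega


lemma flag_true_iff (k m : Int) (l : List Int) (w : Nat) (hw : (w : Int) = max k 1) :
    flagLoop k m l 0 = true ↔
      ∀ i : Nat, i + w ≤ l.length → m ≤ wmax ((l.drop i).take w) := by
  have hw1 : 1 ≤ w := by omega
  constructor
  · intro htrue i hi
    by_contra hlt
    push Not at hlt
    have hlen : ((l.drop i).take w).length = w := by
      simp [List.length_take, List.length_drop]; omega
    have hne : (l.drop i).take w ≠ [] := by
      intro h; rw [h] at hlen; simp at hlen; omega
    have hwin : flagLoop k m l 0 = false := by
      rw [flag_false_iff_window]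
      refine ⟨l.take i, (l.drop i).take w, l.drop (i + w), ?_, by omega, ?_⟩
      · have h1 : (l.drop i).take w ++ (l.drop i).drop w = l.drop i := List.take_append_drop _ _
        have h2 : (l.drop i).drop w = l.drop (i + w) := by
          rw [List.drop_drop]
        rw [← h2, List.append_assoc, h1, List.take_append_drop]
      · intro y hy
        exact lt_of_le_of_lt ((wmax_spec hne).2 y hy) hlt
    rw [htrue] at hwin; simp at hwin
  · intro hall
    by_contra hne
    have hfalse : flagLoop k m l 0 = false := by
      cases h : flagLoop k m l 0
      · rfl
      · exact absurd h hne
    obtain ⟨p, q, r, hl, hql, hqm⟩ := (flag_false_iff_window k m l).mp hfalse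
    have hqw : q.length = w := by omega
    have hdrop : l.drop p.length = q ++ r := by
      rw [hl, List.append_assoc, List.drop_left]
    have htake : (l.drop p.length).take w = q := by
      rw [hdrop, ← hqw, List.take_left]
    have hlen : p.length + w ≤ l.length := by
      rw [hl]; simp; omega
    have := hall p.length hlen
    rw [htake] at this
    have hqne : q ≠ [] := by
      intro h; rw [h] at hqw; simp at hqw; omega
    have hmem := (wmax_spec hqne).1
    exact absurd this (by have := hqm _ hmem; omega)

lemma bsLoop_eq (stones : List Int) (k t : Int) :
    ∀ (fuel : Nat) (l r : Int), (r + 1 - l).toNat < fuel → l ≤ t + 1 → t ≤ r →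
      (∀ m, l ≤ m → m ≤ r → (flagLoop k m stones 0 = true ↔ m ≤ t)) →
      bsLoop stones k fuel l r = t := by
  intro fuel
  induction fuel with
  | zero =>
    intro l r hfuel hl hr H
    exact absurd hfuel (Nat.not_lt_zero _)
  | succ f ih =>
    intro l r hfuel hl hr H
    by_cases hlr : l ≤ r
    · have hmid := PySem.Int.floordiv_two_mid_bounds hlr
      rw [bsLoop, if_pos hlr]
      by_cases hf : flagLoop k (PySem.Int.floordiv (l + r) 2) stones 0 = true
      · rw [if_pos hf]
        have hm : PySem.Int.floordiv (l + r) 2 ≤ t := (H _ hmid.1 hmid.2).mp hf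
        exact ih _ _ (by omega) (by omega) hr (fun m h1 h2 => H m (by omega) h2)
      · rw [if_neg hf]
        have hm : ¬ (PySem.Int.floordiv (l + r) 2 ≤ t) := fun h =>
          hf ((H _ hmid.1 hmid.2).mpr h)
        exact ih _ _ (by omega) hl (by omega) (fun m h1 h2 => H m h1 (by omega))
    · rw [bsLoop, if_neg hlr]
      omega

-- window i of width W is a nonempty sublist of stones when i + W ≤ length and 1 ≤ W
lemma window_ne_nil {stones : List Int} {i W : Nat} (hW : 1 ≤ W) (hi : i + W ≤ stones.length) :
    (stones.drop i).take W ≠ [] := by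
  intro h
  have : ((stones.drop i).take W).length = 0 := by rw [h]; rfl
  simp [List.length_take, List.length_drop] at this
  omega

lemma window_subset {stones : List Int} {i W : Nat} {y : Int}
    (hy : y ∈ (stones.drop i).take W) : y ∈ stones :=
  List.mem_of_mem_drop (List.mem_of_mem_take hy)

-- ===== VERDICT (by name: the statement is the Claim_ definition above) =====
theorem solution_spec : Claim_equal_solution := by
  unfold Claim_equal_solution
  intro stones k _hdom hpre
  unfold Spec_solution
  have hne : stones ≠ [] := hpre
  obtain ⟨x0, t0, hst⟩ := List.exists_cons_of_ne_nil hne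
  have hmin : PySem.List.min? stones (fun y => y) = some (t0.foldl min x0) := by
    rw [hst]; exact PySem.List.min?_id_cons x0 t0
  have hmax : PySem.List.max? stones (fun y => y) = some (t0.foldl max x0) := by
    rw [hst]; exact PySem.List.max?_id_cons x0 t0
  set a := t0.foldl min x0 with hadef
  set b := t0.foldl max x0 with hbdef
  have ha_min : ∀ y ∈ stones, a ≤ y := fun y hy => PySem.List.min?_isMin hmin y hy
  have hb_max : ∀ y ∈ stones, y ≤ b := fun y hy => PySem.List.max?_isMax hmax y hy
  have ha_mem : a ∈ stones := PySem.List.min?_mem hmin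
  have hab : a ≤ b := hb_max a ha_mem
  set n : Nat := stones.length with hndef
  have hn1 : 1 ≤ n := by rw [hndef, hst]; simp
  set W : Nat := (max k 1).toNat with hWdef
  have hWint : (W : Int) = max k 1 := by
    rw [hWdef]; rw [Int.toNat_of_nonneg]; omega
  have hW1 : 1 ≤ W := by omega
  have hw_eq : (if k > 1 then k else (1 : Int)) = max k 1 := by split_ifs <;> omega
  unfold solution solution_alt
  simp only [hmin, hmax, Option.getD_some, hw_eq]
  by_cases hbig : max k 1 > (n : Int)
  · rw [if_pos (by rw [← hndef]; exact_mod_cast hbig)]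
    apply bsLoop_eq stones k b ((b + 1 - a).toNat + 1) a b (by omega) (by omega) le_rfl
    intro m _ hm2
    simp only [iff_true_intro hm2, iff_true]
    by_contra hf
    have hfalse : flagLoop k m stones 0 = false := by
      cases h : flagLoop k m stones 0
      · rfl
      · exact absurd h hf
    obtain ⟨p, q, r, hl, hql, -⟩ := (flag_false_iff_window k m stones).mp hfalse
    have : q.length ≤ n := by rw [hndef, hl]; simp; omega
    omega
  · have hWn : W ≤ n := by omega
    rw [if_neg (by rw [← hndef]; omega)]
    -- rewrite the range and the slices into Nat form
    have hcount : (n : Int) - max k 1 + 1 = ((n - W + 1 : Nat) : Int) := by push_cast; omega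
    rw [← hndef, hcount, PySem.List.pyRange_zero_natCast, List.map_map]
    have hfun : ∀ i : Nat, i < n - W + 1 →
        ((fun i : Int => (PySem.List.max? (PySem.List.slice stones (some i) (some (i + max k 1)))
            (fun y => y)).getD 0) ∘ fun i : Nat => (i : Int)) i
          = wmax ((stones.drop i).take W) := by
      intro i _
      simp only [Function.comp_apply, wmax]
      have h1 : (i : Int) + max k 1 = ((i + W : Nat) : Int) := by push_cast; omega
      rw [h1, PySem.List.slice_natCast]
      have h2 : i + W - i = W := by omega
      rw [h2]
    rw [List.map_congr_left (by intro i hi; exact hfun i (List.mem_range.mp hi))]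
    set L := (List.range (n - W + 1)).map (fun i => wmax ((stones.drop i).take W)) with hLdef
    have hLne : L ≠ [] := by
      rw [hLdef]
      simp [List.map_eq_nil_iff, List.range_eq_nil]
    have hLmem : ∀ y ∈ L, ∃ i : Nat, i + W ≤ n ∧ y = wmax ((stones.drop i).take W) := by
      intro y hy
      rw [hLdef] at hy
      obtain ⟨i, hi, rfl⟩ := List.mem_map.mp hy
      exact ⟨i, by have := List.mem_range.mp hi; omega, rfl⟩
    have hLmem' : ∀ i : Nat, i + W ≤ n → wmax ((stones.drop i).take W) ∈ L := by
      intro i hi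
      rw [hLdef]
      exact List.mem_map.mpr ⟨i, List.mem_range.mpr (by omega), rfl⟩
    cases hmin2 : PySem.List.min? L (fun y => y) with
    | none => exact absurd ((PySem.List.min?_eq_none_iff L _).mp hmin2) hLne
    | some tstar =>
      simp only [Option.getD_some]
      have htmem := PySem.List.min?_mem hmin2
      have htmin : ∀ y ∈ L, tstar ≤ y := fun y hy => PySem.List.min?_isMin hmin2 y hy
      -- tstar is the max of some window, hence an element of stones
      obtain ⟨i0, hi0, ht0⟩ := hLmem tstar htmem
      have hw0 := wmax_spec (window_ne_nil hW1 hi0)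
      have htstones : tstar ∈ stones := by
        rw [ht0]; exact window_subset hw0.1
      have hta : a ≤ tstar := ha_min _ htstones
      have htb : tstar ≤ b := hb_max _ htstones
      apply bsLoop_eq stones k tstar ((b + 1 - a).toNat + 1) a b (by omega) (by omega) htb
      intro m _ _
      rw [flag_true_iff k m stones W hWint]
      constructor
      · intro hall
        have := hall i0 hi0
        rw [← ht0] at this
        exact this
      · intro hm i hi
        exact le_trans hm (htmin _ (hLmem' i hi))
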